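-- pv_equiv track=rewrite | github.com/MeMory-of-MOtion/sobec | python/sobec/walk/weight_share.py | computeBestTransitionDuration
-- ===== SOURCE A (Python) =====
-- def computeBestTransitionDuration(contactPattern, maxTransitionDuration):
--     """
--     Compute the maximal transition duration to avoid bad effects in
--     weightShareSmoothProfile().
--     """
--     contactState = []
--     dur = mindur = len(contactPattern)
--     for t, s in enumerate(contactPattern):
--         dur += 1
--         if s != contactState:
--             contactState = s
--             mindur = min(mindur, dur)
--             dur = 0
--
--     # Select the smoothing transition to be smaller than half of the minimal duration.
--     transitionDuration = min((mindur - 1) // 2, maxTransitionDuration)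
--     return transitionDuration
-- ===== SOURCE B (Python) =====
-- def computeBestTransitionDuration(contactPattern, maxTransitionDuration):
--     """Two-phase version: first materialise the lengths of the consecutive
--     runs of the pattern (with a virtual leading no-contact state []), then
--     take the min over the interior runs and the pattern length."""
--     runs = []
--     prev = None
--     for s in [[]] + contactPattern:
--         if runs and s == prev:
--             runs[-1] += 1
--         else:
--             runs.append(1)
--         prev = s
--     mindur = min([len(contactPattern)] + runs[1:-1])
--     return min((mindur - 1) // 2, maxTransitionDuration)
-- ===== Notes on version B (the rewrite author's own statement) =====
-- stated objective: alternative
-- what changed: B first materialises the list of consecutive-run lengths (with a virtual leading no-contact state) and then takes a separate min pass over the interior runs and the pattern length, instead of A's single scan with dur/mindur accumulators.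
import Mathlib
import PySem

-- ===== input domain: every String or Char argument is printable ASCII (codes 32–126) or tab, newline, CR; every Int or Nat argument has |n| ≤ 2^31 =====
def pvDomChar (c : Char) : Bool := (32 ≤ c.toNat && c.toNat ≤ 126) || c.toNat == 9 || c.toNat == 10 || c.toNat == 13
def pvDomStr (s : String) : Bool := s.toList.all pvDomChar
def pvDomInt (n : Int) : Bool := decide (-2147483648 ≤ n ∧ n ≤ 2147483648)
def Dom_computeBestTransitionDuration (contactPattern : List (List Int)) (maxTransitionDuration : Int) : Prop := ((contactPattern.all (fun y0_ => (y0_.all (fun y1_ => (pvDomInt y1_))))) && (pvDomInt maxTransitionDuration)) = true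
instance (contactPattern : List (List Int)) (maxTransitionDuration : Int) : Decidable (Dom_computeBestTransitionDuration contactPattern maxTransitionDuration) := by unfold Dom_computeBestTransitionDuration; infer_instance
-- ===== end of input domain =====

-- B replaces A's single scan (dur/mindur accumulators) by a run-length build plus a min pass
-- over the interior runs; same results, same cost (objective: alternative).

-- ===== PORT A =====
-- state = (contactState, dur, mindur); Python's enumerate index t is unused, so the fold is over the elements
def computeBestTransitionDuration (contactPattern : List (List Int)) (maxTransitionDuration : Int) : Int :=
  let n : Int := contactPattern.length
  let st := contactPattern.foldl
    (fun (acc : (List Int) × Int × Int) s =>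
      let dur := acc.2.1 + 1
      if s ≠ acc.1 then (s, 0, min acc.2.2 dur) else (acc.1, dur, acc.2.2))
    (([] : List Int), n, n)
  min (PySem.Int.floordiv (st.2.2 - 1) 2) maxTransitionDuration

-- ===== PORT B =====
-- state = (runs, prev); `runs[-1] += 1` becomes dropLast ++ [getLast! + 1]
def computeBestTransitionDuration_alt (contactPattern : List (List Int)) (maxTransitionDuration : Int) : Int :=
  let runs := ((([] : List Int)) :: contactPattern).foldl
    (fun (acc : List Int × Option (List Int)) s =>
      if acc.1 ≠ [] ∧ acc.2 = some s then (acc.1.dropLast ++ [acc.1.getLast! + 1], some s)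
      else (acc.1 ++ [(1 : Int)], some s))
    ([], none) |>.1
  let mindur := ((runs.drop 1).dropLast).foldl min (Int.ofNat contactPattern.length)
  min (PySem.Int.floordiv (mindur - 1) 2) maxTransitionDuration

-- ===== PRECONDITION & SPEC =====
def Spec_computeBestTransitionDuration (contactPattern : List (List Int)) (maxTransitionDuration : Int) (out : Int) : Prop := out = computeBestTransitionDuration_alt contactPattern maxTransitionDuration
instance (contactPattern : List (List Int)) (maxTransitionDuration : Int) (out : Int) : Decidable (Spec_computeBestTransitionDuration contactPattern maxTransitionDuration out) := by unfold Spec_computeBestTransitionDuration; infer_instance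

-- ===== CLAIM (what is proved, stated in full; the proofs are below) =====
def Claim_equal_computeBestTransitionDuration : Prop := ∀ (contactPattern : List (List Int)) (maxTransitionDuration : Int), Dom_computeBestTransitionDuration contactPattern maxTransitionDuration → Spec_computeBestTransitionDuration contactPattern maxTransitionDuration (computeBestTransitionDuration contactPattern maxTransitionDuration)

-- ===== LEMMAS AND PROOFS =====

-- recursive form of A's loop (final mindur)
def recmA : List (List Int) → List Int → Int → Int → Int
  | [], _, _, m => m
  | s :: l, cs, dur, m =>
      if s ≠ cs then recmA l s 0 (min m (dur + 1)) else recmA l cs (dur + 1) m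

-- run lengths of (v :: l) where v's run so far has length c
def runsAux : List (List Int) → List Int → Int → List Int
  | [], _, c => [c]
  | s :: l, v, c => if s = v then runsAux l v (c + 1) else c :: runsAux l s 1

theorem runsAux_ne_nil (l : List (List Int)) (v : List Int) (c : Int) : runsAux l v c ≠ [] := by
  induction l generalizing v c with
  | nil => simp [runsAux]
  | cons s l ih => simp only [runsAux]; split <;> simp [ih]

theorem afold_eq_recmA (l : List (List Int)) (cs : List Int) (dur m : Int) :
    (l.foldl (fun (acc : (List Int) × Int × Int) s =>
        let d := acc.2.1 + 1
        if s ≠ acc.1 then (s, 0, min acc.2.2 d) else (acc.1, d, acc.2.2))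
      (cs, dur, m)).2.2 = recmA l cs dur m := by
  induction l generalizing cs dur m with
  | nil => rfl
  | cons s l ih =>
      simp only [List.foldl_cons]
      by_cases h : s = cs
      · subst h
        rw [recmA, if_neg (by simp)]
        simpa using ih s (dur + 1) m
      · rw [recmA, if_pos h]
        simpa [h] using ih s 0 (min m (dur + 1))

theorem bfold_runs (l : List (List Int)) (racc : List Int) (v : List Int) (c : Int) :
    (l.foldl (fun (acc : List Int × Option (List Int)) s =>
        if acc.1 ≠ [] ∧ acc.2 = some s then (acc.1.dropLast ++ [acc.1.getLast! + 1], some s)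
        else (acc.1 ++ [(1 : Int)], some s))
      (racc ++ [c], some v)).1 = racc ++ runsAux l v c := by
  induction l generalizing racc v c with
  | nil => rfl
  | cons s l ih =>
      simp only [List.foldl_cons, runsAux]
      by_cases h : s = v
      · subst h
        rw [if_pos (by simp), if_pos rfl]
        have hg : ((racc ++ [c]).dropLast ++ [(racc ++ [c]).getLast! + 1]) = racc ++ [c + 1] := by
          simp
        rw [hg]
        exact ih racc s (c + 1)
      · rw [if_neg (by simp; exact fun hv => h hv.symm), if_neg h]
        have := ih (racc ++ [c]) s 1
        simpa using this

-- interior phase: dur tracks the current run length minus one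
theorem recmA_interior (l : List (List Int)) (v : List Int) (c m : Int) :
    recmA l v (c - 1) m = ((runsAux l v c).dropLast).foldl min m := by
  induction l generalizing v c m with
  | nil => simp [recmA, runsAux]
  | cons s l ih =>
      by_cases h : s = v
      · subst h
        rw [recmA, if_neg (by simp), runsAux, if_pos rfl]
        have hc : c - 1 + 1 = (c + 1) - 1 := by ring
        rw [hc, ih]
      · rw [recmA, if_pos h, runsAux, if_neg h]
        rw [List.dropLast_cons_of_ne_nil (runsAux_ne_nil l s 1)]
        have hd : c - 1 + 1 = c := by ring
        rw [hd, List.foldl_cons]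
        have := ih s 1 (min m c)
        norm_num at this
        exact this

-- leading phase: while still in the virtual first run, any change records ≥ dur+1 > m
theorem recmA_lead (l : List (List Int)) (v : List Int) (dur m : Int) (c : Int) (hm : m ≤ dur) :
    recmA l v dur m = (((runsAux l v c).drop 1).dropLast).foldl min m := by
  induction l generalizing v dur c with
  | nil => simp [recmA, runsAux]
  | cons s l ih =>
      by_cases h : s = v
      · subst h
        rw [recmA, if_neg (by simp), runsAux, if_pos rfl]
        exact ih s (dur + 1) (c + 1) (by omega)
      · rw [recmA, if_pos h, runsAux, if_neg h]
        have hmin : min m (dur + 1) = m := by omega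
        rw [hmin]
        simp only [List.drop_one, List.tail_cons]
        have := recmA_interior l s 1 m
        norm_num at this
        exact this

-- ===== VERDICT (by name: the statement is the Claim_ definition above) =====
theorem computeBestTransitionDuration_spec : Claim_equal_computeBestTransitionDuration := by
  intro cp mtd _
  unfold Spec_computeBestTransitionDuration computeBestTransitionDuration computeBestTransitionDuration_alt
  simp only [List.foldl_cons]
  rw [afold_eq_recmA]
  have hb := bfold_runs cp ([] : List Int) ([] : List Int) 1
  simp only [List.nil_append] at hb
  have hstart : (if (([] : List Int) ≠ [] ∧ (none : Option (List Int)) = some ([] : List Int))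
      then (([] : List Int).dropLast ++ [([] : List Int).getLast! + 1], some ([] : List Int))
      else (([] : List Int) ++ [(1 : Int)], some ([] : List Int))) = ([(1 : Int)], some ([] : List Int)) := by
    simp
  rw [hstart, hb]
  rw [recmA_lead cp ([] : List Int) (cp.length : Int) (cp.length : Int) 1 le_rfl]
  rfl
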